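-- pv_equiv track=rewrite | github.com/VAbysov/perflab_tasks | task1/task1.py | circle_massive
-- ===== SOURCE A (Python) =====
-- def circle_massive(n, m):
--     massive = (list(range(1, n+1)))
--     lst = []
--     path = []
--     f = massive[0]
--     l = massive[-1]
--     while l != f:
--         new_interval = (list(interval for interval in massive[0:m]))
--         lst.append(new_interval)
--         massive = massive[m-1:] + massive[:m-1]
--         l = new_interval[-1]
--     for i in range(len(lst)):
--         path.append(lst[i][0])
--     return "".join(map(str, path))
-- ===== SOURCE B (Python) =====
-- def circle_massive(n, m):
--     # Track only the current window-start position p (0-based) by modular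
--     # arithmetic instead of rotating the whole list each step.
--     if n == 1:
--         return ""
--     path = []
--     p = 0
--     while True:
--         path.append(p + 1)
--         p2 = (p + m - 1) % n
--         if p2 == 0:
--             break
--         p = p2
--     return "".join(map(str, path))
-- ===== Notes on version B (the rewrite author's own statement) =====
-- stated objective: faster
-- what changed: B replaces A's per-step O(n) list slicing/rotation (and the stored window lists) by O(1) modular-arithmetic tracking of the window start, appending (p mod n)+1 each step and stopping when (p+m-1) mod n == 0.
import Mathlib
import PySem

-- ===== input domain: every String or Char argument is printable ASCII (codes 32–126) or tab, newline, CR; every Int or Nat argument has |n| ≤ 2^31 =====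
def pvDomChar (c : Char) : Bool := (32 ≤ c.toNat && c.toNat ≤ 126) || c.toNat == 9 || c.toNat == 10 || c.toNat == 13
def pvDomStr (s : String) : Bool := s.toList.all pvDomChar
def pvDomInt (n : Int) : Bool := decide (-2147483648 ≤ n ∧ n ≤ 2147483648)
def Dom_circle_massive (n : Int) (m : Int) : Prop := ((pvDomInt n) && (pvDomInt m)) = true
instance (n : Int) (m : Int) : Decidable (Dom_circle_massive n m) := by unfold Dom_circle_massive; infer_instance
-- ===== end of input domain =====

-- B tracks the window-start position by modular arithmetic (O(1) per step) instead of
-- rotating and slicing the whole list each iteration: objective faster (asymptotic).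


-- ===== PORT A =====
-- the while loop, with fuel (n.toNat suffices on every input Pre_ admits: the visited
-- window starts repeat after at most n steps; the Python loop diverges or raises
-- exactly on the inputs Pre_ excludes)
def cmLoopA (m : Int) (massive : List Int) (lst : List (List Int)) (f l : Int) :
    Nat → List (List Int)
  | 0 => lst
  | fuel + 1 =>
    if l ≠ f then
      let new_interval := PySem.List.slice massive (some 0) (some m)
      let lst' := lst ++ [new_interval]
      let massive' := PySem.List.slice massive (some (m - 1)) none ++
                      PySem.List.slice massive none (some (m - 1))
      match PySem.List.pyGet? new_interval (-1) with
      | some l' => cmLoopA m massive' lst' f l' fuel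
      | none => lst'          -- new_interval[-1] raises IndexError: excluded by Pre_
    else lst

def circle_massive (n : Int) (m : Int) : String :=
  let massive := PySem.List.pyRange 1 (n + 1) 1
  match PySem.List.pyGet? massive 0, PySem.List.pyGet? massive (-1) with
  | some f, some l =>
    let lst := cmLoopA m massive [] f l n.toNat
    let path := (PySem.List.pyRange 0 (PySem.List.len lst) 1).foldl
      (fun path i => path ++ [PySem.List.pyGetD (PySem.List.pyGetD lst i []) 0 0]) []
    PySem.Str.join "" (path.map PySem.Int.toStr)
  | _, _ => ""                -- massive[0] / massive[-1] raises IndexError: excluded by Pre_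

-- ===== PORT B =====
-- the while True loop of Source B, with fuel (n.toNat suffices under Pre_, as above)
def cmLoopB (n m : Int) (p : Int) (path : List Int) : Nat → List Int
  | 0 => path
  | fuel + 1 =>
    let path' := path ++ [p + 1]
    let p2 := PySem.Int.mod (p + m - 1) n
    if p2 = 0 then path'
    else cmLoopB n m p2 path' fuel

def circle_massive_alt (n : Int) (m : Int) : String :=
  if n = 1 then ""
  else PySem.Str.join "" ((cmLoopB n m 0 [] n.natAbs).map PySem.Int.toStr)

-- ===== PRECONDITION & SPEC =====
-- Pre_ excludes exactly the inputs where the Python A raises (n ≤ 0 → IndexError on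
-- massive[0]; n ≥ 2 with m = 0 or m < 1-n → IndexError on new_interval[-1]) or
-- diverges (n ≥ 2 with m > n: the rotation slice leaves massive unchanged forever).
def Pre_circle_massive (n : Int) (m : Int) : Prop :=
  1 ≤ n ∧ (n = 1 ∨ (1 - n ≤ m ∧ m ≠ 0 ∧ m ≤ n))
instance (n : Int) (m : Int) : Decidable (Pre_circle_massive n m) := by
  unfold Pre_circle_massive; infer_instance
def pvWitness_circle_massive : Int × Int := (7, 4)

def Spec_circle_massive (n : Int) (m : Int) (out : String) : Prop := out = circle_massive_alt n m
instance (n : Int) (m : Int) (out : String) : Decidable (Spec_circle_massive n m out) := by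
  unfold Spec_circle_massive; infer_instance

-- ===== CLAIM (what is proved, stated in full; the proofs are below) =====
def Claim_equal_circle_massive : Prop := ∀ (n : Int) (m : Int), Dom_circle_massive n m →
  Pre_circle_massive n m → Spec_circle_massive n m (circle_massive n m)

-- ===== LEMMAS AND PROOFS =====

-- the rotated circle [p+1, …, n, 1, …, p] as a function of the start position p
def rotArr (N p : Nat) : List Int := (List.range N).map (fun i => (((p + i) % N : Nat) : Int) + 1)

theorem rotArr_length (N p : Nat) : (rotArr N p).length = N := by simp [rotArr]

theorem rotArr_getElem? (N p i : Nat) (h : i < N) :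
    (rotArr N p)[i]? = some ((((p + i) % N : Nat) : Int) + 1) := by
  simp [rotArr, h]

-- rotating left by s advances the start position by s (mod N)
theorem rot_step (N s p : Nat) (hs : s ≤ N) :
    (rotArr N p).drop s ++ (rotArr N p).take s = rotArr N ((p + s) % N) := by
  have hlen : (rotArr N p).length = N := by simp [rotArr]
  have key : ∀ i, i < N → ((p + s) % N + i) % N = (p + s + i) % N := by
    intro i hi
    conv_rhs => rw [Nat.add_mod (p + s) i N]
    rw [Nat.mod_eq_of_lt hi]
  apply List.ext_getElem
  · simp [rotArr]; omega
  · intro i h1 h2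
    have hiN : i < N := by simpa [rotArr] using h2
    rcases lt_or_ge i (N - s) with hi | hi
    · rw [List.getElem_append_left (by simp [hlen]; omega)]
      rw [List.getElem_drop]
      simp only [rotArr, List.getElem_map, List.getElem_range]
      rw [key i hiN]
      congr 3
      omega
    · have hlt : i - (N - s) < s := by omega
      rw [List.getElem_append_right (by simp [hlen]; omega)]
      simp only [List.getElem_take, List.length_drop, hlen]
      simp only [rotArr, List.getElem_map, List.getElem_range]
      rw [key i hiN]
      have h3 : p + (i - (N - s)) + N = p + s + i := by omega
      congr 2
      rw [← Nat.add_mod_right (p + (i - (N - s))) N, h3]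

-- A at a state whose window starts at position 0 returns lst whatever the fuel
theorem cmLoopA_stop (m : Int) (massive : List Int) (lst : List (List Int)) (fuel : Nat) :
    cmLoopA m massive lst 1 1 fuel = lst := by
  cases fuel <;> simp [cmLoopA]

theorem emod_neg_small (N k : Nat) (hk1 : 0 < k) (hkN : k ≤ N) :
    (-(k : Int)) % (N : Int) = (N : Int) - k := by
  conv_lhs => rw [show -(k : Int) = ((N : Int) - k) + (N : Int) * (-1) from by ring]
  rw [Int.add_mul_emod_self_left, Int.emod_eq_of_lt (by omega) (by omega)]

-- B's modular step agrees with the Nat-level step (p+s) % N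
theorem mod_step (N : Nat) (hN : 0 < N) (m : Int) (p : Nat) :
    PySem.Int.mod ((p : Int) + m - 1) (N : Int) =
      (((p + ((m - 1) % (N : Int)).toNat) % N : Nat) : Int) := by
  rw [PySem.Int.mod_eq_emod_of_pos (by exact_mod_cast hN : (0:Int) < (N:Int))]
  have ht : ((((m - 1) % (N : Int)).toNat : Int)) = (m - 1) % (N : Int) :=
    Int.toNat_of_nonneg (Int.emod_nonneg _ (by omega))
  rw [show (p:Int) + m - 1 = (p:Int) + (m-1) from by ring]
  push_cast [ht]
  exact (Int.add_emod_emod _ _ _).symm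

-- slices of a rotation, under Pre_'s bounds on m: the window massive[0:m] is the first
-- s+1 elements and the reassigned massive is the rotation by s, where s = (m-1) mod n
theorem slice_window (N : Nat) (hN : 1 ≤ N) (m : Int) (hm1 : 1 - (N : Int) ≤ m)
    (hm0 : m ≠ 0) (hm2 : m ≤ (N : Int)) (p : Nat) :
    PySem.List.slice (rotArr N p) (some 0) (some m) =
      (rotArr N p).take (((m - 1) % (N : Int)).toNat + 1) := by
  have hlen : (rotArr N p).length = N := by simp [rotArr]
  rw [PySem.List.slice_zero_start]
  rcases lt_or_ge m 0 with hneg | hpos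
  · obtain ⟨k, hk, hk1, hkN⟩ : ∃ k : Nat, m = -(k : Int) ∧ 0 < k ∧ k < N := by
      exact ⟨(-m).toNat, by omega, by omega, by omega⟩
    have hm1' : m - 1 = -((k + 1 : Nat) : Int) := by omega
    have he := emod_neg_small N (k + 1) (by omega) (by omega)
    rw [hm1', he, hk, PySem.List.slice_to_neg_natCast _ _ hk1, hlen]
    congr 1
    omega
  · rw [PySem.List.slice_to _ hpos,
        Int.emod_eq_of_lt (by omega : (0:Int) ≤ m - 1) (by omega : m - 1 < (N:Int))]
    congr 1
    omega

theorem slice_rotate (N : Nat) (hN : 1 ≤ N) (m : Int) (hm1 : 1 - (N : Int) ≤ m)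
    (hm0 : m ≠ 0) (hm2 : m ≤ (N : Int)) (p : Nat) :
    PySem.List.slice (rotArr N p) (some (m - 1)) none ++
      PySem.List.slice (rotArr N p) none (some (m - 1)) =
      rotArr N ((p + ((m - 1) % (N : Int)).toNat) % N) := by
  have hlen : (rotArr N p).length = N := by simp [rotArr]
  have hsN : ((m - 1) % (N : Int)).toNat ≤ N := by
    have := Int.emod_lt_of_pos (m - 1) (by omega : (0:Int) < (N:Int))
    omega
  rw [← rot_step N _ p hsN]
  rcases lt_or_ge (m - 1) 0 with hneg | hpos
  · obtain ⟨k, hk, hk1, hkN⟩ : ∃ k : Nat, m - 1 = -(k : Int) ∧ 0 < k ∧ k ≤ N := by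
      exact ⟨(1 - m).toNat, by omega, by omega, by omega⟩
    have he := emod_neg_small N k hk1 hkN
    rw [hk, he, PySem.List.slice_from_neg_natCast _ _ hk1,
        PySem.List.slice_to_neg_natCast _ _ hk1, hlen]
    congr 2 <;> omega
  · rw [PySem.List.slice_from _ hpos, PySem.List.slice_to _ hpos,
        Int.emod_eq_of_lt hpos (by omega : m - 1 < (N:Int))]

theorem window_first (N s p : Nat) (hp : p < N) :
    PySem.List.pyGetD ((rotArr N p).take (s + 1)) 0 0 = (p : Int) + 1 := by
  have h0 : ((rotArr N p).take (s + 1))[0]? = some ((p : Int) + 1) := by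
    rw [List.getElem?_take, if_pos (by omega), rotArr_getElem? N p 0 (by omega),
        Nat.add_zero, Nat.mod_eq_of_lt hp]
  simp [PySem.List.pyGetD_zero, List.getD, h0]

theorem window_last (N s p : Nat) (hs : s < N) :
    PySem.List.pyGet? ((rotArr N p).take (s + 1)) (-1) =
      some ((((p + s) % N : Nat) : Int) + 1) := by
  rw [PySem.List.pyGet?_neg_one]
  have hlen : ((rotArr N p).take (s + 1)).length = s + 1 := by
    simp [rotArr]; omega
  rw [List.getLast?_eq_getElem?, hlen]
  simp only [Nat.add_sub_cancel]
  rw [List.getElem?_take, if_pos (by omega), rotArr_getElem? N p s hs]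

-- the firsts of the collected windows
def firsts (lst : List (List Int)) : List Int := lst.map (fun iv => PySem.List.pyGetD iv 0 0)

-- main loop correspondence: A from the rotation state p (0 < p < N) with l = p+1, f = 1,
-- against B from position p, with equal fuel
theorem loopAB (N : Nat) (hN : 2 ≤ N) (m : Int) (hm1 : 1 - (N : Int) ≤ m)
    (hm0 : m ≠ 0) (hm2 : m ≤ (N : Int)) :
    ∀ (fuel : Nat) (p : Nat), 0 < p → p < N → ∀ (lst : List (List Int)) (out : List Int),
      firsts lst = out →
      firsts (cmLoopA m (rotArr N p) lst 1 ((p : Int) + 1) fuel) =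
        cmLoopB (N : Int) m (p : Int) out fuel := by
  intro fuel
  induction fuel with
  | zero => intro p _ _ lst out h; simpa [cmLoopA, cmLoopB] using h
  | succ fuel ih =>
    intro p hp0 hpN lst out h
    unfold firsts at h
    have hsN : ((m - 1) % (N : Int)).toNat < N := by
      have := Int.emod_lt_of_pos (m - 1) (by omega : (0:Int) < (N:Int))
      have := Int.emod_nonneg (m - 1) (by omega : (N:Int) ≠ 0)
      omega
    have hcond : ((p : Int) + 1 ≠ 1) := by omega
    simp only [cmLoopA, if_pos hcond,
      slice_window N (by omega) m hm1 hm0 hm2 p,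
      slice_rotate N (by omega) m hm1 hm0 hm2 p,
      window_last N (((m - 1) % (N : Int)).toNat) p hsN]
    simp only [cmLoopB, mod_step N (by omega) m p]
    by_cases hz : (p + ((m - 1) % (N : Int)).toNat) % N = 0
    · rw [hz]
      simp only [Nat.cast_zero, zero_add, cmLoopA_stop]
      simp [firsts, h, window_first N (((m - 1) % (N : Int)).toNat) p hpN]
    · have hz' : (((p + ((m - 1) % (N : Int)).toNat) % N : Nat) : Int) ≠ 0 := by
        exact_mod_cast fun hc => hz (Nat.cast_injective hc)
      rw [if_neg hz']
      exact ih _ (Nat.pos_of_ne_zero hz) (Nat.mod_lt _ (by omega))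
        (lst ++ [(rotArr N p).take (((m - 1) % (N : Int)).toNat + 1)]) (out ++ [(p : Int) + 1])
        (by simp [firsts, h, window_first N (((m - 1) % (N : Int)).toNat) p hpN])

theorem rotArr_zero (N : Nat) : PySem.List.pyRange 1 ((N : Int) + 1) 1 = rotArr N 0 := by
  rw [PySem.List.pyRange_one, rotArr]
  simp only [add_sub_cancel_right, Int.toNat_natCast]
  apply List.map_congr_left
  intro i hi
  have : i < N := List.mem_range.mp hi
  rw [Nat.zero_add, Nat.mod_eq_of_lt this]
  omega

theorem rotArr_first (N : Nat) (hN : 0 < N) :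
    PySem.List.pyGet? (rotArr N 0) 0 = some 1 := by
  rw [PySem.List.pyGet?_zero, rotArr_getElem? N 0 0 hN]
  simp

theorem rotArr_last (N : Nat) (hN : 0 < N) :
    PySem.List.pyGet? (rotArr N 0) (-1) = some (N : Int) := by
  rw [PySem.List.pyGet?_neg_one, List.getLast?_eq_getElem?, rotArr_length,
      rotArr_getElem? N 0 (N - 1) (by omega)]
  congr 1
  rw [Nat.zero_add, Nat.mod_eq_of_lt (by omega)]
  omega

-- first iteration of A (window start 0, l = n) against first iteration of B
theorem topAB (N : Nat) (hN : 2 ≤ N) (m : Int) (hm1 : 1 - (N : Int) ≤ m)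
    (hm0 : m ≠ 0) (hm2 : m ≤ (N : Int)) (fuel : Nat) :
    firsts (cmLoopA m (rotArr N 0) [] 1 (N : Int) (fuel + 1)) =
      cmLoopB (N : Int) m 0 [] (fuel + 1) := by
  have hsN : ((m - 1) % (N : Int)).toNat < N := by
    have := Int.emod_lt_of_pos (m - 1) (by omega : (0:Int) < (N:Int))
    have := Int.emod_nonneg (m - 1) (by omega : (N:Int) ≠ 0)
    omega
  have hcond : ((N : Int) ≠ 1) := by omega
  simp only [cmLoopA, if_pos hcond,
    slice_window N (by omega) m hm1 hm0 hm2 0,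
    slice_rotate N (by omega) m hm1 hm0 hm2 0,
    window_last N (((m - 1) % (N : Int)).toNat) 0 hsN]
  simp only [cmLoopB]
  have e : PySem.Int.mod (0 + m - 1) ((N : Nat) : Int) =
      (((0 + ((m - 1) % (N : Int)).toNat) % N : Nat) : Int) := by
    rw [show (0:Int) + m - 1 = ((0:Nat):Int) + m - 1 from by norm_num]
    exact mod_step N (by omega) m 0
  rw [e]
  by_cases hz : (0 + ((m - 1) % (N : Int)).toNat) % N = 0
  · rw [hz]
    simp only [Nat.cast_zero, zero_add, cmLoopA_stop]
    simp [firsts, window_first N (((m - 1) % (N : Int)).toNat) 0 (by omega)]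
  · have hz2 : (((0 + ((m - 1) % (N : Int)).toNat) % N : Nat) : Int) ≠ 0 := by
      exact_mod_cast fun hc => hz (Nat.cast_injective hc)
    rw [if_neg hz2]
    exact loopAB N hN m hm1 hm0 hm2 fuel ((0 + ((m - 1) % (N : Int)).toNat) % N)
      (Nat.pos_of_ne_zero hz) (Nat.mod_lt _ (by omega))
      ([(rotArr N 0).take (((m - 1) % (N : Int)).toNat + 1)]) ([(0 : Int) + 1])
      (by simp [firsts, window_first N (((m - 1) % (N : Int)).toNat) 0 (by omega)])

-- ===== VERDICT (by name: the statement is the Claim_ definition above) =====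
theorem circle_massive_spec : Claim_equal_circle_massive := by
  unfold Claim_equal_circle_massive Spec_circle_massive Pre_circle_massive
  intro n m _ hpre
  obtain ⟨hn1, hcase⟩ := hpre
  by_cases h1 : n = 1
  · subst h1
    have e1 : PySem.List.pyRange 1 ((1:Int)+1) 1 = [1] := by decide
    have e2 : cmLoopA m [1] [] 1 1 1 = [] := cmLoopA_stop m [1] [] 1
    simp only [circle_massive, circle_massive_alt, e1,
      (by decide : PySem.List.pyGet? [(1:Int)] 0 = some (1:Int)),
      (by decide : PySem.List.pyGet? [(1:Int)] (-1) = some (1:Int)),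
      Int.toNat_one, e2]
    simp [PySem.Str.join]
  · have hbounds : 1 - n ≤ m ∧ m ≠ 0 ∧ m ≤ n := by tauto
    obtain ⟨hm1, hm0, hm2⟩ := hbounds
    have hn2 : 2 ≤ n := by omega
    set N : Nat := n.toNat with hNdef
    have hn : n = (N : Int) := by omega
    have hN : 2 ≤ N := by omega
    rw [hn] at hm1 hm2 ⊢
    simp only [circle_massive, circle_massive_alt]
    rw [rotArr_zero N, rotArr_first N (by omega), rotArr_last N (by omega)]
    simp only [Int.toNat_natCast, Int.natAbs_natCast, if_neg (show ¬ (N:Int) = 1 by omega)]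
    have hfirsts : ∀ lst : List (List Int),
        (PySem.List.pyRange 0 (PySem.List.len lst) 1).foldl
          (fun path i => path ++ [PySem.List.pyGetD (PySem.List.pyGetD lst i []) 0 0]) [] =
        firsts lst := by
      intro lst
      rw [PySem.List.len_eq, PySem.List.foldl_pyRange_zero_pyGetD' lst []
        (fun acc iv => acc ++ [PySem.List.pyGetD iv 0 0]) [],
        PySem.List.foldl_append_singleton_eq_map]
      simp [firsts]
    rw [hfirsts]
    have h := topAB N hN m hm1 hm0 hm2 (N - 1)
    rw [show N - 1 + 1 = N from by omega] at h
    rw [h]
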